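-- pv_equiv track=rewrite | github.com/MrBrantCode/unitest_baseline | mut_generate/mist_train_taco/taco_7118/solution.py | count_liked_meals
-- ===== SOURCE A (Python) =====
-- def count_liked_meals(test_cases):
--     def bit_dishes(str_dishes):
--         dishes = [0] * 32
--         (a, e, i, o, u) = (1, 1 << 1, 1 << 2, 1 << 3, 1 << 4)
--         for str_dish in str_dishes:
--             dish = 0
--             for c in str_dish:
--                 if c == 'a':
--                     dish |= a
--                 elif c == 'e':
--                     dish |= e
--                 elif c == 'i':
--                     dish |= i
--                 elif c == 'o':
--                     dish |= o
--                 elif c == 'u':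
--                     dish |= u
--                 if dish == 31:
--                     break
--             dishes[dish] += 1
--         return dishes
--
--     def count_good(dishes):
--         res = 0
--         for i in range(1, 32):
--             for j in range(i + 1, 32):
--                 if i | j == 31:
--                     res += dishes[i] * dishes[j]
--         res += dishes[31] * (dishes[31] - 1) // 2
--         return res
--
--     results = []
--     for dishes in test_cases:
--         dishes_bit_counts = bit_dishes(dishes)
--         liked_meals_count = count_good(dishes_bit_counts)
--         results.append(liked_meals_count)
--
--     return results
-- ===== SOURCE B (Python) =====
-- # Single-pass pair counting: for each dish, add the number of compatible earlier dishes.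
-- BIT = {'a': 1, 'e': 2, 'i': 4, 'o': 8, 'u': 16}
--
-- def count_liked_meals(test_cases):
--     results = []
--     for dishes in test_cases:
--         seen = [0] * 32
--         total = 0
--         for dish in dishes:
--             m = 0
--             for c in dish:
--                 m |= BIT.get(c, 0)
--             if m:
--                 total += sum(seen[p] for p in range(1, 32) if p | m == 31)
--                 seen[m] += 1
--         results.append(total)
--     return results
-- ===== Notes on version B (the rewrite author's own statement) =====
-- stated objective: alternative
-- what changed: Replaces A's two-phase bucket-then-32x32-pair-scan (plus a separate triangular term for the all-vowel bucket) with a single incremental pass that, for each dish, adds the number of already-seen compatible dishes and then records the dish's vowel mask; the mask itself is built from a dict lookup instead of an if-chain with an early break.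
import Mathlib
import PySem

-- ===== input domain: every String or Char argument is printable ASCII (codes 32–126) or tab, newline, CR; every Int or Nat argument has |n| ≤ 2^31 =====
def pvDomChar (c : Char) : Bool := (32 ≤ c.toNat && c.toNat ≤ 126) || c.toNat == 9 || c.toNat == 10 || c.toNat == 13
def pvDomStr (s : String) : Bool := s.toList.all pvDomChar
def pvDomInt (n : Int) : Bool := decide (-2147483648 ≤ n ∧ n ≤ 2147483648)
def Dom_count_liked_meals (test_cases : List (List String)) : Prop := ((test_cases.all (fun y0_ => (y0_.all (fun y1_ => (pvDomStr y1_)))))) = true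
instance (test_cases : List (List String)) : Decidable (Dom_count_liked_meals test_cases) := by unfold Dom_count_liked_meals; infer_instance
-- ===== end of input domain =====

set_option maxRecDepth 40000

-- B replaces A's bucket-then-32×32 pair scan (plus a separate triangular term) with a single
-- incremental pass that counts each compatible pair at its later dish; return values proved equal.

-- ===== PORT A =====
-- inner character loop of bit_dishes, including the early 'break' once dish == 31
def pvBitLoop : List Char → Int → Int
  | [], dish => dish
  | c :: rest, dish =>
    let dish' := if c = 'a' then PySem.Int.bor dish 1
      else if c = 'e' then PySem.Int.bor dish 2
      else if c = 'i' then PySem.Int.bor dish 4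
      else if c = 'o' then PySem.Int.bor dish 8
      else if c = 'u' then PySem.Int.bor dish 16
      else dish
    if dish' = 31 then dish' else pvBitLoop rest dish'

-- dishes[dish] += 1 : the index 'dish' is always in [0, 31], so pyGetD/pySetD are exact here
def pvBitDishes (str_dishes : List String) : List Int :=
  str_dishes.foldl (fun dishes str_dish =>
    let dish := pvBitLoop str_dish.toList 0
    PySem.List.pySetD dishes dish (PySem.List.pyGetD dishes dish 0 + 1))
    (List.replicate 32 0)

def pvCountGood (dishes : List Int) : Int :=
  let res : Int := (PySem.List.pyRange 1 32 1).foldl (fun res i =>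
    (PySem.List.pyRange (i + 1) 32 1).foldl (fun res j =>
      if PySem.Int.bor i j = 31 then
        res + PySem.List.pyGetD dishes i 0 * PySem.List.pyGetD dishes j 0
      else res) res) 0
  res + PySem.Int.floordiv (PySem.List.pyGetD dishes 31 0 * (PySem.List.pyGetD dishes 31 0 - 1)) 2

def count_liked_meals (test_cases : List (List String)) : List Int :=
  test_cases.foldl (fun results dishes =>
    results ++ [pvCountGood (pvBitDishes dishes)]) []

-- ===== PORT B =====
def pvBITq : PySem.Dict Char Int :=
  PySem.Dict.ofList [('a', 1), ('e', 2), ('i', 4), ('o', 8), ('u', 16)]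

-- m |= BIT.get(c, 0) over the characters of the dish
def pvMask (dish : String) : Int :=
  dish.toList.foldl (fun m c => PySem.Int.bor m (PySem.Dict.getD pvBITq c 0)) 0

-- one iteration of B's dish loop; state = (seen, total); indices are in [1, 31], so exact
def pvStepB (st : List Int × Int) (dish : String) : List Int × Int :=
  let m := pvMask dish
  if m ≠ 0 then
    let add := (PySem.List.pyRange 1 32 1).foldl (fun s p =>
      if PySem.Int.bor p m = 31 then s + PySem.List.pyGetD st.1 p 0 else s) 0
    (PySem.List.pySetD st.1 m (PySem.List.pyGetD st.1 m 0 + 1), st.2 + add)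
  else st

def count_liked_meals_alt (test_cases : List (List String)) : List Int :=
  test_cases.foldl (fun results dishes =>
    results ++ [(dishes.foldl pvStepB (List.replicate 32 0, 0)).2]) []

-- ===== PRECONDITION & SPEC =====
def Spec_count_liked_meals (test_cases : List (List String)) (out : List Int) : Prop := out = count_liked_meals_alt test_cases
instance (test_cases : List (List String)) (out : List Int) : Decidable (Spec_count_liked_meals test_cases out) := by unfold Spec_count_liked_meals; infer_instance

-- ===== CLAIM (what is proved, stated in full; the proofs are below) =====
def Claim_equal_count_liked_meals : Prop := ∀ (test_cases : List (List String)), Dom_count_liked_meals test_cases → Spec_count_liked_meals test_cases (count_liked_meals test_cases)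

-- ===== LEMMAS AND PROOFS =====

-- entry i of a bucket list
def pvG (d : List Int) (i : Int) : Int := PySem.List.pyGetD d i 0

-- the compatible later partners of bucket i in A's inner loop
def pvJs (i : Int) : List Int :=
  (PySem.List.pyRange (i + 1) 32 1).filter (fun j => decide (PySem.Int.bor i j = 31))

def pvInner (d : List Int) (i : Int) : Int := ((pvJs i).map (fun j => pvG d i * pvG d j)).sum

def pvS (d : List Int) (m : Int) : Int :=
  (((PySem.List.pyRange 1 32 1).filter (fun p => decide (PySem.Int.bor p m = 31))).map
    (fun p => pvG d p)).sum

-- per-character OR value used by B's mask loop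
def pvF (c : Char) : Int := PySem.Dict.getD pvBITq c 0

lemma pvF_eq (c : Char) : pvF c = if c = 'a' then 1 else if c = 'e' then 2
    else if c = 'i' then 4 else if c = 'o' then 8 else if c = 'u' then 16 else 0 := by
  have hD : pvBITq = PySem.Dict.mk [('a', 1), ('e', 2), ('i', 4), ('o', 8), ('u', 16)] := by decide
  simp only [pvF, hD, PySem.Dict.getD, PySem.Dict.get?_mk_cons, beq_iff_eq]
  by_cases h1 : c = 'a'
  · subst h1; decide
  by_cases h2 : c = 'e'
  · subst h2; decide
  by_cases h3 : c = 'i'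
  · subst h3; decide
  by_cases h4 : c = 'o'
  · subst h4; decide
  by_cases h5 : c = 'u'
  · subst h5; decide
  simp [h1, h2, h3, h4, h5, Ne.symm h1, Ne.symm h2, Ne.symm h3, Ne.symm h4, Ne.symm h5,
    PySem.Dict.get?]

lemma pvF_cases (c : Char) :
    pvF c = 0 ∨ pvF c = 1 ∨ pvF c = 2 ∨ pvF c = 4 ∨ pvF c = 8 ∨ pvF c = 16 := by
  rw [pvF_eq]; split_ifs <;> simp

lemma pvStep_eq (dish : Int) (c : Char) :
    (if c = 'a' then PySem.Int.bor dish 1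
      else if c = 'e' then PySem.Int.bor dish 2
      else if c = 'i' then PySem.Int.bor dish 4
      else if c = 'o' then PySem.Int.bor dish 8
      else if c = 'u' then PySem.Int.bor dish 16
      else dish) = PySem.Int.bor dish (pvF c) := by
  rw [pvF_eq]; split_ifs <;> simp [PySem.Int.bor_zero]

lemma pvBor_range (d b : Int) (hd : 0 ≤ d ∧ d < 32) (hb : 0 ≤ b ∧ b < 32) :
    0 ≤ PySem.Int.bor d b ∧ PySem.Int.bor d b < 32 := by
  rw [PySem.Int.bor_of_nonneg hd.1 hb.1]
  have : d.toNat ||| b.toNat < 32 := Nat.or_lt_two_pow (n := 5) (by omega) (by omega)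
  omega

lemma pvF_range (c : Char) : 0 ≤ pvF c ∧ pvF c < 32 := by
  rcases pvF_cases c with h | h | h | h | h | h <;> rw [h] <;> norm_num

lemma pvMaskFold_range (cs : List Char) (d : Int) (hd : 0 ≤ d ∧ d < 32) :
    0 ≤ cs.foldl (fun m c => PySem.Int.bor m (PySem.Dict.getD pvBITq c 0)) d ∧
      cs.foldl (fun m c => PySem.Int.bor m (PySem.Dict.getD pvBITq c 0)) d < 32 := by
  induction cs generalizing d with
  | nil => simpa using hd
  | cons c rest ih => exact ih _ (pvBor_range d (pvF c) hd (pvF_range c))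

lemma pvFold31 (cs : List Char) :
    cs.foldl (fun m c => PySem.Int.bor m (PySem.Dict.getD pvBITq c 0)) 31 = 31 := by
  induction cs with
  | nil => rfl
  | cons c rest ih =>
    have h : PySem.Int.bor 31 (pvF c) = 31 := by
      rcases pvF_cases c with h | h | h | h | h | h <;> rw [h] <;> decide
    simpa [show PySem.Dict.getD pvBITq c 0 = pvF c from rfl, h] using ih

lemma pvBitLoop_eq (cs : List Char) (d : Int) (hd : 0 ≤ d ∧ d < 32) :
    pvBitLoop cs d = cs.foldl (fun m c => PySem.Int.bor m (PySem.Dict.getD pvBITq c 0)) d := by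
  induction cs generalizing d with
  | nil => rfl
  | cons c rest ih =>
    show (if _ = 31 then _ else pvBitLoop rest _) = _
    rw [pvStep_eq d c]
    by_cases h31 : PySem.Int.bor d (pvF c) = 31
    · simp only [List.foldl_cons, if_pos h31]
      rw [show PySem.Dict.getD pvBITq c 0 = pvF c from rfl, h31, pvFold31]
    · simp only [List.foldl_cons, if_neg h31]
      exact ih _ (pvBor_range d (pvF c) hd (pvF_range c))

lemma pvMask_eq (s : String) : pvBitLoop s.toList 0 = pvMask s := by
  rw [pvMask, pvBitLoop_eq s.toList 0 (by norm_num)]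

lemma pvMask_range (s : String) : 0 ≤ pvMask s ∧ pvMask s < 32 := by
  rw [pvMask]; exact pvMaskFold_range _ 0 (by norm_num)

lemma pvBitDishes_len (ss : List String) : (pvBitDishes ss).length = 32 := by
  unfold pvBitDishes
  induction ss using List.reverseRecOn with
  | nil => rfl
  | append_singleton xs x ih =>
    rw [List.foldl_append, List.foldl_cons, List.foldl_nil,
      PySem.List.pySetD_of_nonneg _ _ (by rw [pvMask_eq]; exact (pvMask_range x).1)]
    simpa using ih

lemma pvG_set (d : List Int) (h : d.length = 32) (n : Nat) (_hn : n < 32) (v : Int)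
    (k : Int) (hk : 0 ≤ k ∧ k < 32) :
    pvG (d.set n v) k = if k = (n : Int) then v else pvG d k := by
  have hlen : (d.set n v).length = 32 := by simp [h]
  rw [pvG, pvG, PySem.List.pyGetD_eq_getElem _ _ hk.1 (by rw [hlen]; exact_mod_cast hk.2),
    PySem.List.pyGetD_eq_getElem _ _ hk.1 (by rw [h]; exact_mod_cast hk.2),
    List.getElem_set]
  by_cases he : k = (n : Int)
  · rw [if_pos he, if_pos (by omega)]
  · rw [if_neg he, if_neg (by omega)]

lemma pvG_pySetD (d : List Int) (h : d.length = 32) (m v k : Int)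
    (hm : 0 ≤ m ∧ m < 32) (hk : 0 ≤ k ∧ k < 32) :
    pvG (PySem.List.pySetD d m v) k = if k = m then v else pvG d k := by
  rw [PySem.List.pySetD_of_nonneg _ _ hm.1,
    pvG_set d h m.toNat (by omega) v k hk]
  congr 1
  simp only [eq_iff_iff]
  omega

-- sum of an "only at m" indicator over a duplicate-free list
lemma pvSum_ite_mem (l : List Int) (hl : l.Nodup) (m c : Int) :
    (l.map (fun j => if j = m then c else 0)).sum = if m ∈ l then c else 0 := by
  induction l with
  | nil => simp
  | cons x t ih =>
    simp only [List.nodup_cons] at hl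
    by_cases h : x = m
    · subst h
      simp [ih hl.2, hl.1]
    · simp [h, ih hl.2, Ne.symm h]

-- filtered sum as an if-sum
lemma pvSum_filter (l : List Int) (p : Int → Bool) (f : Int → Int) :
    ((l.filter p).map f).sum = (l.map (fun x => if p x then f x else 0)).sum := by
  induction l with
  | nil => rfl
  | cons x t ih => by_cases h : p x <;> simp [h, ih]

lemma pvBor_self (m : Int) (hm : 0 ≤ m) : PySem.Int.bor m m = m := by
  rw [PySem.Int.bor_of_nonneg hm hm, Nat.or_self]; exact Int.toNat_of_nonneg hm

lemma pvTri (x : Int) :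
    PySem.Int.floordiv ((x + 1) * x) 2 = PySem.Int.floordiv (x * (x - 1)) 2 + x := by
  rw [PySem.Int.floordiv_eq_ediv_of_pos (by norm_num),
    PySem.Int.floordiv_eq_ediv_of_pos (by norm_num)]
  have : (x + 1) * x = x * (x - 1) + x * 2 := by ring
  rw [this, Int.add_mul_ediv_right _ _ (by norm_num)]

lemma pvCountGood_eq (d : List Int) :
    pvCountGood d = ((PySem.List.pyRange 1 32 1).map (pvInner d)).sum +
      PySem.Int.floordiv (pvG d 31 * (pvG d 31 - 1)) 2 := by
  unfold pvCountGood
  simp only [PySem.List.foldl_ite_eq_foldl_filter, PySem.List.foldl_add]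
  rw [zero_add]; rfl

lemma pvAdd_eq (d : List Int) (m : Int) :
    (PySem.List.pyRange 1 32 1).foldl (fun s p =>
      if PySem.Int.bor p m = 31 then s + PySem.List.pyGetD d p 0 else s) 0 = pvS d m := by
  unfold pvS pvG
  rw [PySem.List.foldl_ite_eq_foldl_filter, PySem.List.foldl_add]
  simp

lemma pvMem_Js (i j : Int) : j ∈ pvJs i ↔ (i + 1 ≤ j ∧ j < 32) ∧ PySem.Int.bor i j = 31 := by
  simp [pvJs, PySem.List.mem_pyRange_one]

lemma pvNodup_Js (i : Int) : (pvJs i).Nodup :=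
  (PySem.List.nodup_pyRange_one _ _).filter _

lemma pvInner_congr (d d' : List Int) (i : Int) (hi : 1 ≤ i ∧ i < 32)
    (h : ∀ k : Int, 1 ≤ k → k < 32 → pvG d k = pvG d' k) : pvInner d i = pvInner d' i := by
  unfold pvInner
  refine congrArg _ (List.map_congr_left fun j hj => ?_)
  rw [pvMem_Js] at hj
  rw [h i hi.1 hi.2, h j (by omega) hj.1.2]

lemma pvCountGood_congr (d d' : List Int)
    (h : ∀ k : Int, 1 ≤ k → k < 32 → pvG d k = pvG d' k) : pvCountGood d = pvCountGood d' := by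
  rw [pvCountGood_eq, pvCountGood_eq, h 31 (by norm_num) (by norm_num)]
  refine congrArg (· + _) (congrArg _ (List.map_congr_left fun i hi => ?_))
  rw [PySem.List.mem_pyRange_one] at hi
  exact pvInner_congr d d' i (by omega) h

lemma pvS_congr (d d' : List Int) (m : Int)
    (h : ∀ k : Int, 1 ≤ k → k < 32 → pvG d k = pvG d' k) : pvS d m = pvS d' m := by
  unfold pvS
  refine congrArg _ (List.map_congr_left fun p hp => ?_)
  have := List.mem_filter.mp hp
  rw [PySem.List.mem_pyRange_one] at this
  exact h p this.1.1 this.1.2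

-- the key delta: bumping bucket m of the tallies adds exactly the compatible-partner sum
lemma pvDelta (d : List Int) (h : d.length = 32) (m : Int) (h1 : 1 ≤ m) (h2 : m < 32) :
    pvCountGood (PySem.List.pySetD d m (pvG d m + 1)) = pvCountGood d + pvS d m := by
  set d' := PySem.List.pySetD d m (pvG d m + 1) with hd'
  have hg : ∀ k : Int, 0 ≤ k → k < 32 →
      pvG d' k = if k = m then pvG d m + 1 else pvG d k := fun k hk1 hk2 =>
    pvG_pySetD d h m _ k ⟨by omega, h2⟩ ⟨hk1, hk2⟩
  have hK : pvInner d' m = pvInner d m + ((pvJs m).map (fun j => pvG d j)).sum := by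
    unfold pvInner
    rw [show ((pvJs m).map (fun j => pvG d' m * pvG d' j)) =
        ((pvJs m).map (fun j => pvG d m * pvG d j + pvG d j)) from
      List.map_congr_left fun j hj => by
        rw [pvMem_Js] at hj
        rw [hg m (by omega) h2, if_pos rfl, hg j (by omega) hj.1.2,
          if_neg (by omega)]
        ring]
    rw [PySem.List.sum_map_add_int]
  have hI : ∀ i : Int, 1 ≤ i → i < 32 → i ≠ m →
      pvInner d' i = pvInner d i + (if m ∈ pvJs i then pvG d i else 0) := by
    intro i hi1 hi2 hne
    unfold pvInner
    rw [show ((pvJs i).map (fun j => pvG d' i * pvG d' j)) =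
        ((pvJs i).map (fun j => pvG d i * pvG d j + (if j = m then pvG d i else 0))) from
      List.map_congr_left fun j hj => by
        rw [pvMem_Js] at hj
        rw [hg i (by omega) hi2, if_neg hne, hg j (by omega) hj.1.2]
        by_cases hjm : j = m
        · subst hjm; rw [if_pos rfl, if_pos rfl]; ring
        · rw [if_neg hjm, if_neg hjm]; ring]
    rw [PySem.List.sum_map_add_int, pvSum_ite_mem _ (pvNodup_Js i)]
  rw [pvCountGood_eq d', pvCountGood_eq d]
  have houter : ((PySem.List.pyRange 1 32 1).map (pvInner d')).sum =
      ((PySem.List.pyRange 1 32 1).map (pvInner d)).sum +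
      ((PySem.List.pyRange 1 32 1).map (fun i =>
        (if i = m then ((pvJs m).map (fun j => pvG d j)).sum else 0) +
        (if m ∈ pvJs i then pvG d i else 0))).sum := by
    rw [← PySem.List.sum_map_add_int]
    refine congrArg _ (List.map_congr_left fun i hi => ?_)
    rw [PySem.List.mem_pyRange_one] at hi
    by_cases him : i = m
    · subst him
      rw [hK, if_pos rfl, if_neg (by
          intro hmem; rw [pvMem_Js] at hmem; omega)]
      ring
    · rw [hI i hi.1 hi.2 him, if_neg him]
      ring
  rw [houter]
  rw [PySem.List.sum_map_add_int]
  rw [pvSum_ite_mem _ (PySem.List.nodup_pyRange_one _ _) m _]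
  rw [if_pos (PySem.List.mem_pyRange_one.mpr ⟨h1, h2⟩)]
  have hSd : pvS d m = ((PySem.List.pyRange 1 32 1).map
      (fun p => if PySem.Int.bor p m = 31 then pvG d p else 0)).sum := by
    unfold pvS
    rw [pvSum_filter]
    refine congrArg _ (List.map_congr_left fun p _ => ?_)
    simp
  have hKs : ((pvJs m).map (fun j => pvG d j)).sum = ((PySem.List.pyRange (m + 1) 32 1).map
      (fun p => if PySem.Int.bor p m = 31 then pvG d p else 0)).sum := by
    unfold pvJs
    rw [pvSum_filter]
    refine congrArg _ (List.map_congr_left fun p _ => ?_)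
    rw [PySem.Int.bor_comm]
    simp
  have hMid : ((PySem.List.pyRange 1 32 1).map (fun i => if m ∈ pvJs i then pvG d i else 0)).sum =
      ((PySem.List.pyRange 1 32 1).map
        (fun i => if i < m ∧ PySem.Int.bor i m = 31 then pvG d i else 0)).sum := by
    refine congrArg _ (List.map_congr_left fun i _ => ?_)
    refine if_congr ?_ rfl rfl
    rw [pvMem_Js]
    constructor
    · rintro ⟨⟨hl, _⟩, hb⟩; exact ⟨by omega, hb⟩
    · rintro ⟨hl, hb⟩; exact ⟨⟨by omega, h2⟩, hb⟩
  have hsplit : PySem.List.pyRange 1 32 1 =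
      PySem.List.pyRange 1 m 1 ++ m :: PySem.List.pyRange (m + 1) 32 1 := by
    rw [PySem.List.pyRange_one_append 1 m 32 h1 (by omega), PySem.List.pyRange_one_cons h2]
  have hlow : ∀ i : Int, i ∈ PySem.List.pyRange 1 m 1 →
      (if i < m ∧ PySem.Int.bor i m = 31 then pvG d i else 0) =
      (if PySem.Int.bor i m = 31 then pvG d i else 0) := by
    intro i hi
    rw [PySem.List.mem_pyRange_one] at hi
    refine if_congr ?_ rfl rfl
    constructor
    · rintro ⟨_, hb⟩; exact hb
    · intro hb; exact ⟨hi.2, hb⟩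
  have hhigh : ∀ i : Int, i ∈ PySem.List.pyRange (m + 1) 32 1 →
      (if i < m ∧ PySem.Int.bor i m = 31 then pvG d i else 0) = 0 := by
    intro i hi
    rw [PySem.List.mem_pyRange_one] at hi
    rw [if_neg (by omega)]
  rw [hMid, hSd, hKs, hsplit]
  simp only [List.map_append, List.map_cons, List.sum_append, List.sum_cons,
    List.map_congr_left hlow, List.map_congr_left hhigh]
  simp only [if_neg (show ¬(m < m ∧ PySem.Int.bor m m = 31) from fun hc => absurd hc.1 (by omega))]
  have hzero : ((PySem.List.pyRange (m + 1) 32 1).map (fun _ : Int => (0 : Int))).sum = 0 := by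
    simp
  rw [hzero]
  have hbself : (if PySem.Int.bor m m = 31 then pvG d m else 0) =
      (if m = 31 then pvG d m else 0) := by
    rw [pvBor_self m (by omega)]
  rw [hbself]
  by_cases hm31 : m = 31
  · subst hm31
    rw [hg 31 (by norm_num) (by norm_num), if_pos rfl, if_pos rfl]
    have : (pvG d 31 + 1) * (pvG d 31 + 1 - 1) = (pvG d 31 + 1) * pvG d 31 := by ring
    rw [this, pvTri]
    ring
  · rw [hg 31 (by norm_num) (by norm_num), if_neg (by omega), if_neg hm31]
    ring

lemma pvG_set00 (b : List Int) (hb : b.length = 32) (v : Int) (k : Int) (hk : 1 ≤ k ∧ k < 32) :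
    pvG (b.set 0 v) k = pvG b k := by
  have := pvG_pySetD b hb 0 v k (by norm_num) ⟨by omega, hk.2⟩
  rw [PySem.List.pySetD_of_nonneg _ _ (by norm_num)] at this
  simpa [if_neg (show ¬ k = 0 by omega)] using this

lemma pvCGrep : pvCountGood (List.replicate 32 0) = 0 := by decide

-- loop invariant: B's state after any prefix is A's tallies (with slot 0 cleared) and A's answer
lemma pvCase_eq (ss : List String) :
    ss.foldl pvStepB (List.replicate 32 0, 0) =
      ((pvBitDishes ss).set 0 0, pvCountGood (pvBitDishes ss)) := by
  induction ss using List.reverseRecOn with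
  | nil =>
    show (List.replicate 32 0, (0 : Int)) = _
    rw [show pvBitDishes [] = List.replicate 32 0 from rfl, pvCGrep]
    simp
  | append_singleton xs x ih =>
    have hb : (pvBitDishes xs).length = 32 := pvBitDishes_len xs
    set b := pvBitDishes xs with hbdef
    have hA : pvBitDishes (xs ++ [x]) =
        PySem.List.pySetD b (pvMask x) (pvG b (pvMask x) + 1) := by
      unfold pvBitDishes
      rw [List.foldl_append, List.foldl_cons, List.foldl_nil, pvMask_eq]
      rfl
    rw [List.foldl_append, List.foldl_cons, List.foldl_nil, ih, hA]
    have hm := pvMask_range x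
    show pvStepB _ x = _
    unfold pvStepB
    by_cases hm0 : pvMask x = 0
    · rw [if_neg (by simpa using hm0)]
      rw [hm0]
      have h00 : PySem.List.pySetD b 0 (pvG b 0 + 1) = b.set 0 (pvG b 0 + 1) := by
        rw [PySem.List.pySetD_of_nonneg _ _ (by norm_num)]; rfl
      rw [h00, List.set_set]
      exact congrArg (Prod.mk _)
        (pvCountGood_congr b _ fun k hk1 hk2 => (pvG_set00 b hb _ k ⟨hk1, hk2⟩).symm)
    · rw [if_pos (by simpa using hm0)]
      have hm1 : 1 ≤ pvMask x := by omega
      have c1 : pvG (b.set 0 0) (pvMask x) = pvG b (pvMask x) :=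
        pvG_set00 b hb 0 (pvMask x) ⟨hm1, hm.2⟩
      have c2 : PySem.List.pySetD (b.set 0 0) (pvMask x) (pvG b (pvMask x) + 1) =
          (PySem.List.pySetD b (pvMask x) (pvG b (pvMask x) + 1)).set 0 0 := by
        rw [PySem.List.pySetD_of_nonneg _ _ hm.1, PySem.List.pySetD_of_nonneg _ _ hm.1,
          List.set_comm _ _ (by omega)]
      have c3 : (PySem.List.pyRange 1 32 1).foldl (fun s p =>
          if PySem.Int.bor p (pvMask x) = 31 then s + PySem.List.pyGetD (b.set 0 0) p 0 else s) 0 =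
          pvS b (pvMask x) := by
        rw [pvAdd_eq]
        exact pvS_congr _ b _ fun k hk1 hk2 => pvG_set00 b hb 0 k ⟨hk1, hk2⟩
      show (PySem.List.pySetD (b.set 0 0) (pvMask x) (PySem.List.pyGetD (b.set 0 0) (pvMask x) 0 + 1),
          pvCountGood b + _) = _
      rw [show PySem.List.pyGetD (b.set 0 0) (pvMask x) 0 = pvG (b.set 0 0) (pvMask x) from rfl,
        c1, c2, c3, pvDelta b hb (pvMask x) hm1 hm.2]

-- ===== VERDICT (by name: the statement is the Claim_ definition above) =====
theorem count_liked_meals_spec : Claim_equal_count_liked_meals := by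
  intro tcs _
  unfold Spec_count_liked_meals count_liked_meals count_liked_meals_alt
  rw [PySem.List.foldl_append_singleton_eq_map, PySem.List.foldl_append_singleton_eq_map]
  refine congrArg _ (List.map_congr_left fun ss _ => ?_)
  rw [pvCase_eq]
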